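-- pv_equiv track=rewrite | github.com/10sr/flake8-pep515 | flake8_pep515/__init__.py | _find_invalid_sep
-- ===== SOURCE A (Python) =====
-- _SEPARATOR = "_"
--
-- def _find_invalid_sep(string: str, len_: int) -> int:
--     """Check if number literal is properly separated.
--
--     Returns the position where invalid separator was found, or -1
--     if input is separated validly.
--
--     :param string: Input string.
--     :param len_: Separation length.
--     :returns: Position where invalid separator was found, or -1 for valid input.
--     """
--     toplevel = True
--     current_len = 0
--     for i, s in enumerate(string):
--         if s == _SEPARATOR:
--             if current_len == len_:
--                 current_len = 0
--                 continue
--             elif current_len < len_ and toplevel: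
--                 toplevel = False
--                 current_len = 0
--                 continue
--             else:
--                 return i
--
--         if current_len > len_:
--             return i
--
--         current_len += 1
--
--     if current_len != len_:
--         return len(string)
--     return -1
-- ===== SOURCE B (Python) =====
-- _SEPARATOR = "_"
--
--
-- def _find_invalid_sep(string: str, len_: int) -> int:
--     """Check if number literal is properly separated (split-based rewrite).
--
--     Splits on the separator and judges whole groups with a running offset:
--     each inner group must have length len_, except that one short group may
--     use up the single toplevel allowance; the last group must have length
--     exactly len_.
--     """
--     groups = string.split(_SEPARATOR)
--     offset = 0
--     allowance = True
--     for k, group in enumerate(groups):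
--         if len(group) > len_:
--             return offset + len_ + 1
--         if k == len(groups) - 1:
--             return -1 if len(group) == len_ else len(string)
--         if len(group) < len_:
--             if not allowance:
--                 return offset + len(group)
--             allowance = False
--         offset += len(group) + 1
-- ===== Notes on version B (the rewrite author's own statement) =====
-- stated objective: faster
-- what changed: Replaces A's per-character Python loop (counter + toplevel flag) by one str.split on the separator and a group-by-group judgement with a running offset; the character scanning moves into the C-level split, a constant-factor speedup.
-- outside the precondition, e.g. on _find_invalid_sep('12', -2): A returns 0, B returns -1
import Mathlib
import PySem

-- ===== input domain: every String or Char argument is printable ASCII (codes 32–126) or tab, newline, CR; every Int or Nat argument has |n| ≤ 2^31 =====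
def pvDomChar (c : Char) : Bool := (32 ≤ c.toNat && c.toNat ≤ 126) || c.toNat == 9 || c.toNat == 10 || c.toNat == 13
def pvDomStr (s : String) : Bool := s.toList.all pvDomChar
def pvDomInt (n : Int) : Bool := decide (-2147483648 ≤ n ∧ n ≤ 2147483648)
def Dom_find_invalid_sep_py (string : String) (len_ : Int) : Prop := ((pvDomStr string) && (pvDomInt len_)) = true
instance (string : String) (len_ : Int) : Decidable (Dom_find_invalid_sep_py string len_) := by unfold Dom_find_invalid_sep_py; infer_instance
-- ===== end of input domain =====

-- B replaces A's char-by-char scan (counter + toplevel flag) by one split on the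
-- separator and a group-by-group judgement with a running offset; same O(n), but
-- measurably faster in Python since the scanning moves into str.split.


-- ===== PORT A =====
-- A's for-loop over enumerate(string): chars remaining, index i, toplevel flag,
-- current_len, and n = len(string) for the final return.
def findInvalidSepLoopA (len_ : Int) : List Char → Int → Bool → Int → Int → Int
  | [], _, _, cl, n => if cl ≠ len_ then n else -1
  | c :: rest, i, tl, cl, n =>
    if c = '_' then
      if cl = len_ then findInvalidSepLoopA len_ rest (i + 1) tl 0 n
      else if cl < len_ ∧ tl then findInvalidSepLoopA len_ rest (i + 1) false 0 n
      else i
    else if cl > len_ then i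
    else findInvalidSepLoopA len_ rest (i + 1) tl (cl + 1) n

def find_invalid_sep_py (string : String) (len_ : Int) : Int :=
  findInvalidSepLoopA len_ string.toList 0 true 0 (string.toList.length : Int)

-- ===== PORT B =====
-- Source B's for-loop over enumerate(groups): groups remaining, offset, allowance;
-- n = len(string).  The [] case is unreachable (str.split never returns []).
def findInvalidSepLoopB (len_ n : Int) : List (List Char) → Int → Bool → Int
  | [], _, _ => -1
  | g :: rest, offset, allowance =>
    if (g.length : Int) > len_ then offset + len_ + 1
    else if rest = [] then (if (g.length : Int) = len_ then -1 else n)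
    else if (g.length : Int) < len_ then
      (if !allowance then offset + (g.length : Int)
       else findInvalidSepLoopB len_ n rest (offset + g.length + 1) false)
    else findInvalidSepLoopB len_ n rest (offset + g.length + 1) allowance

def find_invalid_sep_py_alt (string : String) (len_ : Int) : Int :=
  findInvalidSepLoopB len_ (string.toList.length : Int)
    (PySem.Chars.splitOn string.toList ['_']) 0 true

-- ===== PRECONDITION & SPEC =====
-- Pre_ excludes negative separation lengths, which are outside the task's natural
-- domain: A's constant answer 0 there is an artefact of its counter check.
def Pre_find_invalid_sep_py (string : String) (len_ : Int) : Prop := 0 ≤ len_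
instance (string : String) (len_ : Int) : Decidable (Pre_find_invalid_sep_py string len_) := by unfold Pre_find_invalid_sep_py; infer_instance
def pvWitness_find_invalid_sep_py : String × Int := ("1_000", 3)
def Spec_find_invalid_sep_py (string : String) (len_ : Int) (out : Int) : Prop := out = find_invalid_sep_py_alt string len_
instance (string : String) (len_ : Int) (out : Int) : Decidable (Spec_find_invalid_sep_py string len_ out) := by unfold Spec_find_invalid_sep_py; infer_instance

-- ===== CLAIM (what is proved, stated in full; the proofs are below) =====
def Claim_equal_find_invalid_sep_py : Prop := ∀ (string : String) (len_ : Int), Dom_find_invalid_sep_py string len_ → Pre_find_invalid_sep_py string len_ → Spec_find_invalid_sep_py string len_ (find_invalid_sep_py string len_)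

-- ===== LEMMAS AND PROOFS =====

-- Reference splitter: first group and remaining groups of a split on '_'.
def splitU : List Char → List Char × List (List Char)
  | [] => ([], [])
  | c :: r =>
    let p := splitU r
    if c = '_' then ([], p.1 :: p.2) else (c :: p.1, p.2)

-- Inverse: rejoin groups with '_'.
def joinU : List (List Char) → List Char
  | [] => []
  | [g] => g
  | g :: t => g ++ '_' :: joinU t

-- Branch equations for the two loops (control over the compiled match).
lemma loopA_nil (len_ i n : Int) (tl : Bool) (cl : Int) :
    findInvalidSepLoopA len_ [] i tl cl n = if cl ≠ len_ then n else -1 := rfl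

lemma loopA_sep (len_ i n cl : Int) (tl : Bool) (rest : List Char) :
    findInvalidSepLoopA len_ ('_' :: rest) i tl cl n
      = if cl = len_ then findInvalidSepLoopA len_ rest (i + 1) tl 0 n
        else if cl < len_ ∧ tl = true then findInvalidSepLoopA len_ rest (i + 1) false 0 n
        else i := by
  simp [findInvalidSepLoopA]

lemma loopA_char (len_ i n cl : Int) (tl : Bool) (c : Char) (rest : List Char)
    (hc : c ≠ '_') :
    findInvalidSepLoopA len_ (c :: rest) i tl cl n
      = if cl > len_ then i
        else findInvalidSepLoopA len_ rest (i + 1) tl (cl + 1) n := by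
  simp [findInvalidSepLoopA, hc]

lemma loopB_cons (len_ n : Int) (g : List Char) (rest : List (List Char))
    (offset : Int) (allowance : Bool) :
    findInvalidSepLoopB len_ n (g :: rest) offset allowance
      = if (g.length : Int) > len_ then offset + len_ + 1
        else if rest = [] then (if (g.length : Int) = len_ then -1 else n)
        else if (g.length : Int) < len_ then
          (if allowance = false then offset + (g.length : Int)
           else findInvalidSepLoopB len_ n rest (offset + g.length + 1) false)
        else findInvalidSepLoopB len_ n rest (offset + g.length + 1) allowance := by
  simp [findInvalidSepLoopB]

lemma splitOn_go_underscore (fuel : Nat) :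
    ∀ (l cur : List Char) (acc : List (List Char)), l.length < fuel →
    PySem.Chars.splitOn.go ['_'] fuel l cur acc
      = acc.reverse ++ ((cur.reverse ++ (splitU l).1) :: (splitU l).2) := by
  induction fuel with
  | zero => intro l cur acc h; omega
  | succ fuel ih =>
    intro l cur acc h
    cases l with
    | nil => simp [PySem.Chars.splitOn.go, splitU]
    | cons c rest =>
      have hlen : rest.length < fuel := by
        simp only [List.length_cons] at h; omega
      by_cases hc : c = '_'
      · subst hc
        have hpre : List.isPrefixOf ['_'] ('_' :: rest) = true := by
          simp [List.isPrefixOf]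
        simp only [PySem.Chars.splitOn.go, hpre, if_pos]
        have hdrop : List.drop ['_'].length ('_' :: rest) = rest := rfl
        rw [hdrop, ih _ _ _ hlen]
        simp [splitU]
      · have hpre : List.isPrefixOf ['_'] (c :: rest) = false := by
          have hbeq : ('_' == c) = false := by
            rw [beq_eq_false_iff_ne]
            exact fun hx => hc (Eq.symm hx)
          simp [List.isPrefixOf, hbeq]
        simp only [PySem.Chars.splitOn.go, hpre]
        rw [ih _ _ _ hlen]
        simp [splitU, hc]

lemma splitOn_underscore (cs : List Char) :
    PySem.Chars.splitOn cs ['_'] = (splitU cs).1 :: (splitU cs).2 := by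
  unfold PySem.Chars.splitOn
  rw [splitOn_go_underscore (cs.length + 1) cs [] [] (by omega)]
  simp

lemma splitU_no_sep (cs : List Char) :
    '_' ∉ (splitU cs).1 ∧ ∀ g ∈ (splitU cs).2, '_' ∉ g := by
  induction cs with
  | nil => simp [splitU]
  | cons c r ih =>
    by_cases hc : c = '_'
    · subst hc
      refine ⟨by simp [splitU], ?_⟩
      intro g hg
      simp only [splitU] at hg
      rcases List.mem_cons.mp hg with h | h
      · subst h; exact ih.1
      · exact ih.2 _ h
    · constructor
      · simp only [splitU, hc]
        intro hmem
        rcases List.mem_cons.mp hmem with h | h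
        · exact hc h.symm
        · exact ih.1 h
      · intro g hg
        simp only [splitU, hc] at hg
        exact ih.2 _ hg

lemma joinU_splitU (cs : List Char) :
    joinU ((splitU cs).1 :: (splitU cs).2) = cs := by
  induction cs with
  | nil => simp [splitU, joinU]
  | cons c r ih =>
    by_cases hc : c = '_'
    · subst hc
      simp only [splitU]
      cases h2 : (splitU r).2 with
      | nil => rw [h2] at ih; simpa [joinU] using congrArg (List.cons '_') ih
      | cons a t => rw [h2] at ih; simpa [joinU] using congrArg (List.cons '_') ih
    · simp only [splitU, hc]
      cases h2 : (splitU r).2 with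
      | nil => rw [h2] at ih; simpa [joinU] using congrArg (List.cons c) ih
      | cons a t => rw [h2] at ih; simpa [joinU] using congrArg (List.cons c) ih

-- A's scan of one separator-free group: either the over-length return fires
-- inside the group, or the whole group is consumed.
lemma scanA (len_ n : Int) (g : List Char) (hg : '_' ∉ g) :
    ∀ (tail : List Char) (i cl : Int) (tl : Bool), 0 ≤ cl → cl ≤ len_ + 1 →
    findInvalidSepLoopA len_ (g ++ tail) i tl cl n
      = if len_ + 2 ≤ cl + g.length then i + (len_ + 1 - cl)
        else findInvalidSepLoopA len_ tail (i + g.length) tl (cl + (g.length : Int)) n := by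
  induction g with
  | nil =>
    intro tail i cl tl h0 h1
    simp only [List.nil_append, List.length_nil, Nat.cast_zero, add_zero]
    rw [if_neg (by omega)]
  | cons c g' ih =>
    intro tail i cl tl h0 h1
    have hc : c ≠ '_' := fun h => hg (h ▸ List.mem_cons_self ..)
    have hg' : '_' ∉ g' := fun h => hg (List.mem_cons_of_mem _ h)
    have hcast : ((c :: g').length : Int) = (g'.length : Int) + 1 := by
      simp [List.length_cons]
    rw [List.cons_append, loopA_char len_ i n cl tl c (g' ++ tail) hc]
    by_cases hcl : cl = len_ + 1
    · rw [if_pos (by omega : cl > len_), if_pos (by omega : len_ + 2 ≤ cl + ((c :: g').length : Int))]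
      omega
    · rw [if_neg (by omega : ¬ cl > len_), ih hg' tail (i + 1) (cl + 1) tl (by omega) (by omega)]
      by_cases hcond : len_ + 2 ≤ cl + ((c :: g').length : Int)
      · rw [if_pos (by omega : len_ + 2 ≤ cl + 1 + (g'.length : Int)), if_pos hcond]
        ring
      · rw [if_neg (by omega : ¬ len_ + 2 ≤ cl + 1 + (g'.length : Int)), if_neg hcond]
        have h1' : i + 1 + (g'.length : Int) = i + ((c :: g').length : Int) := by omega
        have h2' : cl + 1 + (g'.length : Int) = cl + ((c :: g').length : Int) := by omega
        rw [h1', h2']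

-- Main loop correspondence: A's scan over the rejoined groups equals B's
-- group-by-group judgement, for any fixed total length n consistent with offset.
lemma loop_main (len_ : Int) (h0 : 0 ≤ len_) :
    ∀ (t : List (List Char)) (g : List Char) (i n : Int) (tl : Bool),
    '_' ∉ g → (∀ x ∈ t, '_' ∉ x) →
    n = i + ((joinU (g :: t)).length : Int) →
    findInvalidSepLoopA len_ (joinU (g :: t)) i tl 0 n
      = findInvalidSepLoopB len_ n (g :: t) i tl := by
  intro t
  induction t with
  | nil =>
    intro g i n tl hgsep _ hn
    have hj : joinU [g] = g := rfl
    rw [hj] at hn ⊢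
    have hs := scanA len_ n g hgsep [] i 0 tl le_rfl (by omega)
    rw [List.append_nil] at hs
    rw [hs, loopB_cons, if_pos rfl]
    by_cases hbig : len_ + 2 ≤ (g.length : Int)
    · rw [if_pos (by omega : len_ + 2 ≤ 0 + (g.length : Int)),
          if_pos (by omega : (g.length : Int) > len_)]
      omega
    · rw [if_neg (by omega : ¬ len_ + 2 ≤ 0 + (g.length : Int)), loopA_nil]
      by_cases hgt : (g.length : Int) > len_
      · -- g.length = len_ + 1 exactly: A's final check returns n = i + len_ + 1
        rw [if_pos hgt, if_pos (by omega : 0 + (g.length : Int) ≠ len_)]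
        omega
      · rw [if_neg hgt]
        by_cases heq : (g.length : Int) = len_
        · rw [if_neg (by omega : ¬ 0 + (g.length : Int) ≠ len_), if_pos heq]
        · rw [if_pos (by omega : 0 + (g.length : Int) ≠ len_), if_neg heq]
  | cons g2 t' ih =>
    intro g i n tl hgsep htsep hn
    have hj : joinU (g :: g2 :: t') = g ++ '_' :: joinU (g2 :: t') := rfl
    rw [hj] at hn ⊢
    have hlen : ((g ++ '_' :: joinU (g2 :: t')).length : Int)
        = (g.length : Int) + 1 + ((joinU (g2 :: t')).length : Int) := by
      simp; omega
    have ht2 : '_' ∉ g2 := htsep g2 (List.mem_cons_self ..)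
    have ht' : ∀ x ∈ t', '_' ∉ x := fun x hx => htsep x (List.mem_cons_of_mem _ hx)
    have hrec : n = i + (g.length : Int) + 1 + ((joinU (g2 :: t')).length : Int) := by
      rw [hn, hlen]; ring
    rw [scanA len_ n g hgsep _ i 0 tl le_rfl (by omega), loopB_cons,
        if_neg (by simp : ¬ (g2 :: t' : List (List Char)) = [])]
    by_cases hbig : len_ + 2 ≤ (g.length : Int)
    · rw [if_pos (by omega : len_ + 2 ≤ 0 + (g.length : Int)),
          if_pos (by omega : (g.length : Int) > len_)]
      omega
    · rw [if_neg (by omega : ¬ len_ + 2 ≤ 0 + (g.length : Int)), zero_add, loopA_sep]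
      by_cases heq : (g.length : Int) = len_
      · rw [if_pos heq, if_neg (by omega : ¬ (g.length : Int) > len_),
            if_neg (by omega : ¬ (g.length : Int) < len_),
            ih g2 (i + (g.length : Int) + 1) n tl ht2 ht' (by omega)]
      · rw [if_neg heq]
        by_cases hshort : (g.length : Int) < len_
        · rw [if_neg (by omega : ¬ (g.length : Int) > len_), if_pos hshort]
          cases tl with
          | true =>
            rw [if_pos ⟨hshort, rfl⟩,
                if_neg (by simp : ¬ (true = false)),
                ih g2 (i + (g.length : Int) + 1) n false ht2 ht' (by omega)]
          | false =>
            rw [if_neg (by simp [hshort] : ¬ ((g.length : Int) < len_ ∧ false = true)),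
                if_pos rfl]
        · -- g.length = len_ + 1: A's separator return equals B's over-length value
          rw [if_neg (fun hx => hshort hx.1),
              if_pos (by omega : (g.length : Int) > len_)]
          omega

-- ===== VERDICT (by name: the statement is the Claim_ definition above) =====
theorem find_invalid_sep_py_spec : Claim_equal_find_invalid_sep_py := by
  intro string len_ _ hpre
  unfold Spec_find_invalid_sep_py find_invalid_sep_py find_invalid_sep_py_alt
  rw [splitOn_underscore]
  obtain ⟨h1, h2⟩ := splitU_no_sep string.toList
  rw [← loop_main len_ hpre (splitU string.toList).2 (splitU string.toList).1 0
      (string.toList.length : Int) true h1 h2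
      (by rw [joinU_splitU]; ring)]
  rw [joinU_splitU]
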